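-- pv_equiv track=rewrite | github.com/rhai-code/voice-agents | ai-voice-agent/deploy/models/higgs-audio/higgs_audio_tokenizer.py | xcodec_get_output_length
-- ===== SOURCE A (Python) =====
-- def xcodec_get_output_length(input_length: int):
--     conv_transpose_layers = [
--         dict(kernel_size=16, stride=8, padding=4, output_padding=0),
--         dict(kernel_size=10, stride=5, padding=3, output_padding=1),
--         dict(kernel_size=8, stride=4, padding=2, output_padding=0),
--         dict(kernel_size=4, stride=2, padding=1, output_padding=0),
--         dict(kernel_size=6, stride=3, padding=2, output_padding=1),
--     ]
--     length = input_length
--     for layer in conv_transpose_layers: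
--         length = (length - 1) * layer["stride"] - 2 * layer["padding"] + layer[
--             "kernel_size"] + layer["output_padding"]
--     return length
-- ===== SOURCE B (Python) =====
-- def xcodec_get_output_length(input_length: int):
--     # Each layer maps L -> stride*L + (kernel - stride - 2*padding + output_padding),
--     # and for these five layers every additive term is zero, so the pipeline is
--     # just multiplication by the product of the strides.
--     strides = (8, 5, 4, 2, 3)
--     factor = 1
--     for s in strides:
--         factor *= s
--     return input_length * factor
-- ===== Notes on version B (the rewrite author's own statement) =====
-- stated objective: simpler
-- what changed: Replaced the per-layer affine recurrence over five dict-described conv-transpose layers by a closed form: each layer's additive term is zero, so the result is input_length times the product of the strides (960).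
import Mathlib
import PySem

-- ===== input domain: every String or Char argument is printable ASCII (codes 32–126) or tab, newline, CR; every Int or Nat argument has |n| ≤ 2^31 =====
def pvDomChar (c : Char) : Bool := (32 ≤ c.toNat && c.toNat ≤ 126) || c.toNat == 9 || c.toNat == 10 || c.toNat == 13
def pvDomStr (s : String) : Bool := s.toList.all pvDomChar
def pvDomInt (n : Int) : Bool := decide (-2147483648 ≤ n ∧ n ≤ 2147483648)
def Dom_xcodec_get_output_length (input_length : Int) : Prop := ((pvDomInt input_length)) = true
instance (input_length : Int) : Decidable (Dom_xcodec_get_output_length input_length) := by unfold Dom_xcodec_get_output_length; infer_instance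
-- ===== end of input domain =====

-- B replaces the five-layer affine recurrence by the closed form input_length × (product of strides): simpler.


-- ===== PORT A =====
-- Port of A: fold the affine recurrence over the five layer dicts (kernel, stride, padding, output_padding).
def xcodec_get_output_length (input_length : Int) : Int :=
  let conv_transpose_layers : List (Int × Int × Int × Int) :=
    [(16, 8, 4, 0), (10, 5, 3, 1), (8, 4, 2, 0), (4, 2, 1, 0), (6, 3, 2, 1)]
  conv_transpose_layers.foldl
    (fun length layer =>
      (length - 1) * layer.2.1 - 2 * layer.2.2.1 + layer.1 + layer.2.2.2)
    input_length

-- ===== PORT B =====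
-- Port of B: closed form — every layer's additive term is zero, so multiply by the product of strides.
def xcodec_get_output_length_alt (input_length : Int) : Int :=
  let strides : List Int := [8, 5, 4, 2, 3]
  input_length * strides.foldl (· * ·) 1

-- ===== PRECONDITION & SPEC =====
def Spec_xcodec_get_output_length (input_length : Int) (out : Int) : Prop := out = xcodec_get_output_length_alt input_length
instance (input_length : Int) (out : Int) : Decidable (Spec_xcodec_get_output_length input_length out) := by unfold Spec_xcodec_get_output_length; infer_instance

-- ===== CLAIM (what is proved, stated in full; the proofs are below) =====
def Claim_equal_xcodec_get_output_length : Prop := ∀ (input_length : Int), Dom_xcodec_get_output_length input_length → Spec_xcodec_get_output_length input_length (xcodec_get_output_length input_length)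

-- ===== LEMMAS AND PROOFS =====

-- ===== VERDICT (by name: the statement is the Claim_ definition above) =====
theorem xcodec_get_output_length_spec : Claim_equal_xcodec_get_output_length := by
  intro input_length _
  unfold Spec_xcodec_get_output_length xcodec_get_output_length xcodec_get_output_length_alt
  simp [List.foldl]
  ring
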